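-- pv_equiv track=rewrite | github.com/RafaellSanchez/RepoMega-DataPipeline | scripts/grt_number.py | calcular_maior_numero_jogos
-- ===== SOURCE A (Python) =====
-- import itertools
--
-- def calcular_maior_numero_jogos(numeros_disponiveis, tamanho_jogo, quantidade_jogos):
--     combinacoes = list(itertools.combinations(numeros_disponiveis, tamanho_jogo))
--
--     jogos = []
--
--     for combinacao in combinacoes:
--         if len(jogos) >= quantidade_jogos:
--             break
--         if all(set(combinacao).isdisjoint(jogo) for jogo in jogos):
--             jogos.append(combinacao)
--
--     return jogos
-- ===== SOURCE B (Python) =====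
-- def calcular_maior_numero_jogos(numeros_disponiveis, tamanho_jogo, quantidade_jogos):
--     jogos = []
--     usados = set()
--     while len(jogos) < quantidade_jogos:
--         jogo = []
--         for n in numeros_disponiveis:
--             if n not in usados:
--                 jogo.append(n)
--                 if len(jogo) == tamanho_jogo:
--                     break
--         if len(jogo) != tamanho_jogo:
--             break
--         jogos.append(tuple(jogo))
--         usados.update(jogo)
--     return jogos
-- ===== Notes on version B (the rewrite author's own statement) =====
-- stated objective: faster
-- what changed: A enumerates all C(n,k) k-combinations and greedily filters them for pairwise-disjoint games; B never builds combinations: it repeatedly scans the input left to right collecting the first tamanho_jogo numbers not yet used, which is provably the same greedy result.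
-- outside the precondition, e.g. on calcular_maior_numero_jogos([1, 2], 0, 2): A returns [()], B returns []
import Mathlib
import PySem

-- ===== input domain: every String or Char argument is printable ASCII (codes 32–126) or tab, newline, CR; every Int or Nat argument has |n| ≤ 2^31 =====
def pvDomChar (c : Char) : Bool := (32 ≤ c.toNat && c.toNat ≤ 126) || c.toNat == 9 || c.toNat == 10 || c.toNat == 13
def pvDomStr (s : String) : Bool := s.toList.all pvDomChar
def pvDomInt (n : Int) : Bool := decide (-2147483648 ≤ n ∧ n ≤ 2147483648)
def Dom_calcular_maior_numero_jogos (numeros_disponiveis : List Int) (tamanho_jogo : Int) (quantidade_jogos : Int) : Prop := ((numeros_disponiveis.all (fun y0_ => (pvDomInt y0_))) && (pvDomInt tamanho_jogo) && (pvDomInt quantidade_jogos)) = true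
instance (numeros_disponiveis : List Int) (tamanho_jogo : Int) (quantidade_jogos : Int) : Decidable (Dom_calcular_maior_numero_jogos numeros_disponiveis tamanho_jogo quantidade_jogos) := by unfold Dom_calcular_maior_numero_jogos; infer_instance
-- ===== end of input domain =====

-- B replaces A's enumeration of all C(n,k) combinations by a repeated left-to-right scan that
-- collects the first tamanho_jogo not-yet-used numbers per game (objective: faster, asymptotic).

-- ===== PORT A =====
-- itertools.combinations(xs, k) in Python's lexicographic order (by position)
def pvComb (xs : List Int) (k : Nat) : List (List Int) :=
  match k, xs with
  | 0, _ => [[]]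
  | _ + 1, [] => []
  | k + 1, x :: rest => (pvComb rest k).map (fun c => x :: c) ++ pvComb rest (k + 1)

-- all(set(combinacao).isdisjoint(jogo) for jogo in jogos)
def pvOkA (jogos : List (List Int)) (c : List Int) : Bool :=
  jogos.all (fun jogo => c.all (fun x => !(jogo.contains x)))

-- the 'for combinacao in combinacoes' loop with its break
def pvLoopA (q : Int) (jogos : List (List Int)) : List (List Int) → List (List Int)
  | [] => jogos
  | c :: rest =>
      if q ≤ (jogos.length : Int) then jogos
      else if pvOkA jogos c then pvLoopA q (jogos ++ [c]) rest
      else pvLoopA q jogos rest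

-- tamanho_jogo.toNat: Python raises ValueError for a negative tamanho_jogo (outside Pre_)
def calcular_maior_numero_jogos (numeros_disponiveis : List Int) (tamanho_jogo : Int) (quantidade_jogos : Int) : List (List Int) :=
  pvLoopA quantidade_jogos [] (pvComb numeros_disponiveis tamanho_jogo.toNat)

-- ===== PORT B =====
-- the inner 'for n in numeros_disponiveis' scan with its break (jogo is the accumulator)
def pvScanB (usados : PySem.Set Int) (k : Int) : List Int → List Int → List Int
  | [], jogo => jogo
  | n :: ns, jogo =>
      if PySem.Set.contains usados n then pvScanB usados k ns jogo
      else
        let jogo' := jogo ++ [n]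
        if (jogo'.length : Int) = k then jogo' else pvScanB usados k ns jogo'

-- the 'while len(jogos) < quantidade_jogos' loop; each iteration appends one game, so the
-- iteration count is exactly bounded by quantidade_jogos, used here as fuel
def pvLoopB (k : Int) (xs : List Int) : Nat → List (List Int) → PySem.Set Int → List (List Int)
  | 0, jogos, _ => jogos
  | fuel + 1, jogos, usados =>
      let jogo := pvScanB usados k xs []
      if (jogo.length : Int) = k then
        pvLoopB k xs fuel (jogos ++ [jogo]) (PySem.Set.update usados jogo)
      else jogos

def calcular_maior_numero_jogos_alt (numeros_disponiveis : List Int) (tamanho_jogo : Int) (quantidade_jogos : Int) : List (List Int) :=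
  pvLoopB tamanho_jogo numeros_disponiveis quantidade_jogos.toNat [] PySem.Set.empty

-- ===== PRECONDITION & SPEC =====
-- Pre_ excludes tamanho_jogo ≤ 0: a negative tamanho_jogo makes A raise ValueError, and at
-- tamanho_jogo = 0 the single empty game A emits (itertools' one empty combination) is an
-- artefact of the enumeration that B's scanning loop cannot produce.
def Pre_calcular_maior_numero_jogos (numeros_disponiveis : List Int) (tamanho_jogo : Int) (quantidade_jogos : Int) : Prop :=
  1 ≤ tamanho_jogo
instance (numeros_disponiveis : List Int) (tamanho_jogo : Int) (quantidade_jogos : Int) : Decidable (Pre_calcular_maior_numero_jogos numeros_disponiveis tamanho_jogo quantidade_jogos) := by unfold Pre_calcular_maior_numero_jogos; infer_instance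

def pvWitness_calcular_maior_numero_jogos : List Int × Int × Int := ([1, 2, 3, 4], 2, 2)

def Spec_calcular_maior_numero_jogos (numeros_disponiveis : List Int) (tamanho_jogo : Int) (quantidade_jogos : Int) (out : List (List Int)) : Prop := out = calcular_maior_numero_jogos_alt numeros_disponiveis tamanho_jogo quantidade_jogos
instance (numeros_disponiveis : List Int) (tamanho_jogo : Int) (quantidade_jogos : Int) (out : List (List Int)) : Decidable (Spec_calcular_maior_numero_jogos numeros_disponiveis tamanho_jogo quantidade_jogos out) := by unfold Spec_calcular_maior_numero_jogos; infer_instance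

-- ===== CLAIM (what is proved, stated in full; the proofs are below) =====
def Claim_equal_calcular_maior_numero_jogos : Prop := ∀ (numeros_disponiveis : List Int) (tamanho_jogo : Int) (quantidade_jogos : Int), Dom_calcular_maior_numero_jogos numeros_disponiveis tamanho_jogo quantidade_jogos → Pre_calcular_maior_numero_jogos numeros_disponiveis tamanho_jogo quantidade_jogos → Spec_calcular_maior_numero_jogos numeros_disponiveis tamanho_jogo quantidade_jogos (calcular_maior_numero_jogos numeros_disponiveis tamanho_jogo quantidade_jogos)


-- ===== LEMMAS AND PROOFS =====

-- 'c is disjoint from every already used number in U'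
def pvValid (U : List Int) (c : List Int) : Bool := c.all (fun x => !(U.contains x))

theorem pvOkA_eq_valid (J : List (List Int)) (c : List Int) :
    pvOkA J c = pvValid J.flatten c := by
  rw [Bool.eq_iff_iff]
  simp [pvOkA, pvValid, List.mem_flatten]
  tauto

theorem pvValid_append_false {U V c : List Int} (h : pvValid U c = false) :
    pvValid (U ++ V) c = false := by
  simp [pvValid] at *
  obtain ⟨x, hx, hm⟩ := h
  exact ⟨x, hx, fun _ => absurd hm (by tauto)⟩

theorem pvValid_self_false {U c : List Int} (h : c ≠ []) :
    pvValid (U ++ c) c = false := by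
  simp [pvValid]
  obtain ⟨x, t, rfl⟩ := List.exists_cons_of_ne_nil h
  exact ⟨x, by simp, fun _ => by simp⟩

theorem pvValid_take_filter (U xs : List Int) (k : Nat) :
    pvValid U ((xs.filter (fun n => !(U.contains n))).take k) = true := by
  simp [pvValid]
  intro x hx
  have := List.mem_of_mem_take hx
  simp at this
  exact this.2

theorem pvLoopA_stop {q : Int} {J : List (List Int)} (h : q ≤ (J.length : Int))
    (l : List (List Int)) : pvLoopA q J l = J := by
  induction l with
  | nil => rfl
  | cons c rest ih => simp [pvLoopA, h]

theorem pvLoopA_skip {q : Int} {J : List (List Int)} (S : List (List Int)) :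
    ∀ (P : List (List Int)),
    (∀ e ∈ P, pvOkA J e = false) → pvLoopA q J (P ++ S) = pvLoopA q J S := by
  intro P
  induction P with
  | nil => simp
  | cons e P ih =>
    intro h
    simp only [List.cons_append, pvLoopA]
    by_cases hq : q ≤ (J.length : Int)
    · rw [if_pos hq, pvLoopA_stop hq]
    · rw [if_neg hq, h e (by simp), ih (fun x hx => h x (by simp [hx]))]
      simp
theorem pvComb_not_found (xs : List Int) : ∀ (k : Nat) (U : List Int), 1 ≤ k →
    (xs.filter (fun n => !(U.contains n))).length < k →
    ∀ e ∈ pvComb xs k, pvValid U e = false := by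
  induction xs with
  | nil =>
    intro k U hk _ e he
    obtain ⟨m, rfl⟩ : ∃ m, k = m + 1 := ⟨k - 1, by omega⟩
    simp [pvComb] at he
  | cons x xs ih =>
    intro k U hk hlen e he
    obtain ⟨m, rfl⟩ : ∃ m, k = m + 1 := ⟨k - 1, by omega⟩
    rw [pvComb] at he
    rw [List.filter_cons] at hlen
    rcases List.mem_append.mp he with hmap | htail
    · obtain ⟨c, hc, rfl⟩ := List.mem_map.mp hmap
      by_cases hx : x ∈ U
      · simp [pvValid, hx]
      · have hxc : (!U.contains x) = true := by simpa using hx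
        rw [if_pos hxc] at hlen
        match m with
        | 0 => simp at hlen
        | m + 1 =>
          rw [List.length_cons] at hlen
          have := ih (m + 1) U (by omega) (by omega) c hc
          simp [pvValid] at this ⊢
          obtain ⟨y, hy, hyU⟩ := this
          exact fun _ => ⟨y, hy, hyU⟩
    · have hlen' : (xs.filter (fun n => !(U.contains n))).length < m + 1 := by
        by_cases hx : (!U.contains x) = true
        · rw [if_pos hx, List.length_cons] at hlen; omega
        · rwa [if_neg hx] at hlen
      exact ih (m + 1) U hk hlen' e htail

theorem pvComb_found (xs : List Int) : ∀ (k : Nat) (U : List Int), 1 ≤ k →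
    k ≤ (xs.filter (fun n => !(U.contains n))).length →
    ∃ P S, pvComb xs k = P ++ ((xs.filter (fun n => !(U.contains n))).take k) :: S ∧
      ∀ e ∈ P, pvValid U e = false := by
  induction xs with
  | nil => intro k U hk h; simp at h; omega
  | cons x xs ih =>
    intro k U hk h
    obtain ⟨m, rfl⟩ : ∃ m, k = m + 1 := ⟨k - 1, by omega⟩
    by_cases hx : x ∈ U
    · have hxc : (!U.contains x) = false := by simpa using hx
      have hfc : (x :: xs).filter (fun n => !(U.contains n)) = xs.filter (fun n => !(U.contains n)) := by
        rw [List.filter_cons, if_neg (by rw [hxc]; simp)]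
      rw [hfc] at h ⊢
      obtain ⟨P, S, hsplit, hP⟩ := ih (m + 1) U hk h
      refine ⟨(pvComb xs m).map (fun c => x :: c) ++ P, S, ?_, ?_⟩
      · rw [pvComb, hsplit, List.append_assoc]
      · intro e he
        rcases List.mem_append.mp he with hmap | hPm
        · obtain ⟨c, _, rfl⟩ := List.mem_map.mp hmap
          simp [pvValid]
          exact fun hcon => absurd hx hcon
        · exact hP e hPm
    · have hxc : (!U.contains x) = true := by simpa using hx
      have hfc : (x :: xs).filter (fun n => !(U.contains n)) = x :: xs.filter (fun n => !(U.contains n)) := by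
        rw [List.filter_cons, if_pos hxc]
      rw [hfc] at h ⊢
      match m with
      | 0 =>
        refine ⟨[], (pvComb xs 1), ?_, by simp⟩
        rw [pvComb]
        simp [pvComb]
      | m + 1 =>
        rw [List.length_cons] at h
        have h' : m + 1 ≤ (xs.filter (fun n => !(U.contains n))).length := by omega
        obtain ⟨P, S, hsplit, hP⟩ := ih (m + 1) U (by omega) h'
        refine ⟨P.map (fun c => x :: c), (S.map (fun c => x :: c)) ++ pvComb xs (m + 2), ?_, ?_⟩
        · rw [pvComb, hsplit]
          simp [List.take_succ_cons]
        · intro e he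
          obtain ⟨c, hc, rfl⟩ := List.mem_map.mp he
          have := hP c hc
          simp [pvValid] at this ⊢
          obtain ⟨y, hy, hyU⟩ := this
          exact fun _ => ⟨y, hy, hyU⟩
theorem pvScanB_eq_take (usados : PySem.Set Int) (k : Int) (xs : List Int) : ∀ (acc : List Int),
    (acc.length : Int) < k →
    pvScanB usados k xs acc
      = acc ++ (xs.filter (fun n => !(PySem.Set.contains usados n))).take (k - acc.length).toNat := by
  induction xs with
  | nil => intro acc h; simp [pvScanB]
  | cons n ns ih =>
    intro acc h
    by_cases hm : n ∈ usados
    · have hc : PySem.Set.contains usados n = true := by simpa using hm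
      have h1 : pvScanB usados k (n :: ns) acc = pvScanB usados k ns acc := by
        simp [pvScanB, hm]
      rw [h1, ih acc h, List.filter_cons]
      simp [hm]
    · have hc : PySem.Set.contains usados n = false := by simpa using hm
      have h1 : pvScanB usados k (n :: ns) acc
          = if (acc ++ [n]).length = k then acc ++ [n] else pvScanB usados k ns (acc ++ [n]) := by
        simp [pvScanB, hm]
      rw [h1, List.filter_cons]
      by_cases hl : ((acc ++ [n]).length : Int) = k
      · have hk1 : (k - (acc.length : Int)).toNat = 1 := by simp at hl; omega
        rw [if_pos hl]
        simp [hm, hk1]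
      · have hlt : ((acc ++ [n]).length : Int) < k := by simp at hl ⊢; omega
        rw [if_neg hl, ih (acc ++ [n]) hlt]
        have hk1 : (k - (acc.length : Int)).toNat = (k - ((acc ++ [n]).length : Int)).toNat + 1 := by
          simp at hl ⊢; omega
        rw [hk1]
        simp [hm]

theorem pvMain (k : Int) (xs : List Int) (q : Int) : ∀ (fuel : Nat) (J : List (List Int)) (U : PySem.Set Int),
    1 ≤ k →
    (∀ x : Int, PySem.Set.contains U x = ((J.flatten).contains x)) →
    fuel = (q - J.length).toNat →
    pvLoopA q J (pvComb xs k.toNat) = pvLoopB k xs fuel J U := by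
  intro fuel
  induction fuel with
  | zero =>
    intro J U hk hU hf
    have hq : q ≤ (J.length : Int) := by omega
    rw [pvLoopA_stop hq]
    rfl
  | succ f ihf =>
    intro J U hk hU hf
    have hq : ¬ q ≤ (J.length : Int) := by omega
    have hfilter : xs.filter (fun n => !(PySem.Set.contains U n))
        = xs.filter (fun n => !((J.flatten).contains n)) := by
      apply List.filter_congr
      intro n _
      rw [hU n]
    have hscan : pvScanB U k xs [] = (xs.filter (fun n => !((J.flatten).contains n))).take k.toNat := by
      rw [pvScanB_eq_take U k xs [] (by simp; omega), hfilter]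
      simp
    by_cases hfound : k.toNat ≤ (xs.filter (fun n => !((J.flatten).contains n))).length
    · have hlenc : ((pvScanB U k xs []).length : Int) = k := by
        rw [hscan, List.length_take]
        omega
      obtain ⟨P, S, hsplit, hP⟩ := pvComb_found xs k.toNat J.flatten (by omega) hfound
      have hclen : ((xs.filter (fun n => !((J.flatten).contains n))).take k.toNat).length = k.toNat := by
        rw [List.length_take]; omega
      set c := (xs.filter (fun n => !((J.flatten).contains n))).take k.toNat with hc
      have hcne : c ≠ [] := by
        intro hnil
        rw [hnil] at hclen
        simp at hclen
        omega
      have h1 : pvLoopA q J (pvComb xs k.toNat) = pvLoopA q J (c :: S) := by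
        rw [hsplit]
        exact pvLoopA_skip _ P (fun e he => by rw [pvOkA_eq_valid]; exact hP e he)
      have hokc : pvOkA J c = true := by
        rw [pvOkA_eq_valid]
        exact pvValid_take_filter J.flatten xs k.toNat
      have h2 : pvLoopA q J (c :: S) = pvLoopA q (J ++ [c]) S := by
        simp [pvLoopA, hq, hokc]
      have hinv : ∀ e ∈ P ++ [c], pvOkA (J ++ [c]) e = false := by
        intro e he
        rw [pvOkA_eq_valid]
        have hfl : (J ++ [c]).flatten = J.flatten ++ c := by simp
        rw [hfl]
        rcases List.mem_append.mp he with hp | hcm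
        · exact pvValid_append_false (hP e hp)
        · simp at hcm
          subst hcm
          exact pvValid_self_false hcne
      have h3 : pvLoopA q (J ++ [c]) S = pvLoopA q (J ++ [c]) (pvComb xs k.toNat) := by
        rw [hsplit, show P ++ c :: S = (P ++ [c]) ++ S by simp]
        rw [pvLoopA_skip _ (P ++ [c]) hinv]
      have hU' : ∀ x : Int, PySem.Set.contains (PySem.Set.update U c) x = (((J ++ [c]).flatten).contains x) := by
        intro x
        rw [Bool.eq_iff_iff]
        rw [PySem.Set.contains_iff, PySem.Set.mem_update]
        have hx := hU x
        rw [Bool.eq_iff_iff, PySem.Set.contains_iff] at hx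
        simp [hx]
      have hf' : f = (q - ((J ++ [c]).length : Int)).toNat := by
        simp only [List.length_append, List.length_singleton]
        push_cast
        omega
      rw [h1, h2, h3, ihf (J ++ [c]) (PySem.Set.update U c) hk hU' hf']
      conv_rhs => rw [pvLoopB]
      simp only [hscan, hclen]
      rw [if_pos (show ((k.toNat : Int) = k) by omega)]
    · rw [not_le] at hfound
      have hall := pvComb_not_found xs k.toNat J.flatten (by omega) hfound
      have h1 : pvLoopA q J (pvComb xs k.toNat) = J := by
        have := pvLoopA_skip (q := q) (J := J) [] (pvComb xs k.toNat)
          (fun e he => by rw [pvOkA_eq_valid]; exact hall e he)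
        simpa using this
      have hlen : ¬ ((pvScanB U k xs []).length : Int) = k := by
        rw [hscan, List.length_take]
        push_cast
        omega
      rw [h1, pvLoopB]
      simp [hlen]

-- ===== VERDICT (by name: the statement is the Claim_ definition above) =====
theorem calcular_maior_numero_jogos_spec : Claim_equal_calcular_maior_numero_jogos := by
  intro xs k q _ hpre
  unfold Pre_calcular_maior_numero_jogos at hpre
  unfold Spec_calcular_maior_numero_jogos
  unfold calcular_maior_numero_jogos calcular_maior_numero_jogos_alt
  exact pvMain k xs q q.toNat [] PySem.Set.empty hpre (fun x => rfl) (by simp)
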